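-- pv_equiv track=rewrite | github.com/spignotti/urban-tree-transfer | notebooks/exploratory/exp_03_correlation_analysis.py | resolve_base_alias
-- ===== SOURCE A (Python) =====
-- def resolve_base_alias(base: str, columns: set[str]) -> str:
--     if any(col.startswith(f"{base}_") for col in columns):
--         return base
--     if base.startswith("B") and base[1:].isdigit():
--         alt = f"B{int(base[1:]):02d}"
--         if any(col.startswith(f"{alt}_") for col in columns):
--             return alt
--     base_lower = base.lower()
--     if any(col.startswith(f"{base_lower}_") for col in columns):
--         return base_lower
--     return base
-- ===== SOURCE B (Python) =====
-- def resolve_base_alias(base: str, columns: set[str]) -> str: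
--     # Index build: collect every prefix of a column that ends at an underscore,
--     # then test candidates by constant-time set membership.
--     prefixes = set()
--     for col in columns:
--         pref = ""
--         for ch in col:
--             pref += ch
--             if ch == '_':
--                 prefixes.add(pref)
--     candidates = [base]
--     if base.startswith("B") and base[1:].isdigit():
--         candidates.append("B" + str(int(base[1:])).zfill(2))
--     candidates.append(base.lower())
--     for cand in candidates:
--         if cand + "_" in prefixes:
--             return cand
--     return base
-- ===== Notes on version B (the rewrite author's own statement) =====
-- stated objective: faster
-- what changed: B builds an index (a set of every underscore-terminated column prefix) in one pass over the columns and then resolves the candidate list by constant-time set-membership lookups, instead of A's three separate any(col.startswith(...)) scans over the columns.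
import Mathlib
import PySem

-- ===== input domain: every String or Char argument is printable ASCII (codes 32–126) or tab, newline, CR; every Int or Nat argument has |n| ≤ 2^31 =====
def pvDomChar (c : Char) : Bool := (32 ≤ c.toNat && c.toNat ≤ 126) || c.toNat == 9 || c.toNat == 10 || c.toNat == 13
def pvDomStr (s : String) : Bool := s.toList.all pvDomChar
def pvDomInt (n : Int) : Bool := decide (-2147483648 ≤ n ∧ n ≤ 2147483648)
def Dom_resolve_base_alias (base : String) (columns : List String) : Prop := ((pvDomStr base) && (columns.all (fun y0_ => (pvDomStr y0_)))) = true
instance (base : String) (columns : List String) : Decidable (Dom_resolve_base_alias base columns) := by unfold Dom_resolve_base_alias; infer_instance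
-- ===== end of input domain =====

-- B replaces A's three repeated `any(col.startswith(...))` scans by one index of all
-- underscore-terminated column prefixes built once, then set-membership tests (objective: faster, measured).

-- ===== PORT A =====
-- Python's fallthrough to the `base_lower` check (reached from two places) as a helper.
def pvLowerFallback (base : String) (columns : List String) : String :=
  let bl := PySem.Chars.lower base.toList
  if columns.any (fun col => PySem.Chars.startswith col.toList (bl ++ ['_'])) then String.ofList bl
  else base

-- base[1:] is base.toList.tail (PySem.List.slice_from_one); f"B{n:02d}" with n ≥ 0 is 'B' ++ str(n).zfill(2);
-- int(base[1:]) is guarded by isdigit, so ofChars? is some there and the .getD 0 default is never taken.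
def resolve_base_alias (base : String) (columns : List String) : String :=
  let b := base.toList
  if columns.any (fun col => PySem.Chars.startswith col.toList (b ++ ['_'])) then base
  else if PySem.Chars.startswith b ['B'] && PySem.Chars.strIsdigit b.tail then
    let alt := 'B' :: PySem.Chars.zfill (PySem.Int.toChars ((PySem.Int.ofChars? b.tail).getD 0)) 2
    if columns.any (fun col => PySem.Chars.startswith col.toList (alt ++ ['_'])) then String.ofList alt
    else pvLowerFallback base columns
  else pvLowerFallback base columns

-- ===== PORT B =====
-- Source B's inner loop: walk col once, accumulating the growing prefix and adding it to the set at each '_'.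
def pvAddUPrefixes (s : PySem.Set (List Char)) (col : List Char) : PySem.Set (List Char) :=
  (col.foldl (fun (p : List Char × PySem.Set (List Char)) ch =>
      let pref := p.1 ++ [ch]
      (pref, if ch = '_' then PySem.Set.add p.2 pref else p.2)) ([], s)).2

def resolve_base_alias_alt (base : String) (columns : List String) : String :=
  let prefixes := columns.foldl (fun s col => pvAddUPrefixes s col.toList) PySem.Set.empty
  let b := base.toList
  let candidates :=
    [b] ++ (if PySem.Chars.startswith b ['B'] && PySem.Chars.strIsdigit b.tail then
              ['B' :: PySem.Chars.zfill (PySem.Int.toChars ((PySem.Int.ofChars? b.tail).getD 0)) 2]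
            else [])
        ++ [PySem.Chars.lower b]
  match candidates.find? (fun c => PySem.Set.contains prefixes (c ++ ['_'])) with
  | some c => String.ofList c
  | none => base

-- ===== PRECONDITION & SPEC =====
def Spec_resolve_base_alias (base : String) (columns : List String) (out : String) : Prop := out = resolve_base_alias_alt base columns
instance (base : String) (columns : List String) (out : String) : Decidable (Spec_resolve_base_alias base columns out) := by unfold Spec_resolve_base_alias; infer_instance

-- ===== CLAIM (what is proved, stated in full; the proofs are below) =====
def Claim_equal_resolve_base_alias : Prop := ∀ (base : String) (columns : List String), Dom_resolve_base_alias base columns → Spec_resolve_base_alias base columns (resolve_base_alias base columns)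

-- ===== LEMMAS AND PROOFS =====

-- Spec of Source B's inner loop: the underscore-terminated extensions of p0 along col.
def pvUprefs (p0 : List Char) : List Char → List (List Char)
  | [] => []
  | c :: rest => (if c = '_' then [p0 ++ [c]] else []) ++ pvUprefs (p0 ++ [c]) rest

lemma pvUprefs_map (l : List Char) : ∀ p0, pvUprefs p0 l = (pvUprefs [] l).map (p0 ++ ·) := by
  induction l with
  | nil => intro p0; simp [pvUprefs]
  | cons c rest ih =>
    intro p0
    simp only [pvUprefs, List.map_append, List.nil_append, ih (p0 ++ [c]), ih [c], List.map_map]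
    split_ifs <;> simp [Function.comp_def]

lemma mem_pvUprefs_getLast {x : List Char} {l : List Char} :
    ∀ p0, x ∈ pvUprefs p0 l → x.getLast? = some '_' := by
  induction l with
  | nil => intro p0 h; simp [pvUprefs] at h
  | cons c rest ih =>
    intro p0 h
    simp only [pvUprefs, List.mem_append] at h
    rcases h with h | h
    · split_ifs at h with hc
      · simp only [List.mem_singleton] at h
        subst h hc; exact List.getLast?_concat
      · simp at h
    · exact ih _ h

lemma mem_pvUprefs_iff : ∀ (q : List Char), q.getLast? = some '_' →
    ∀ l, (q ∈ pvUprefs [] l ↔ q <+: l) := by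
  intro q
  induction q with
  | nil => intro hq; simp at hq
  | cons d q' ihq =>
    intro hq l
    cases l with
    | nil => simp [pvUprefs]
    | cons c rest =>
      rw [show pvUprefs [] (c :: rest) = (if c = '_' then [[c]] else []) ++ pvUprefs [c] rest
            from by simp [pvUprefs]]
      rw [pvUprefs_map rest [c]]
      simp only [List.mem_append, List.mem_map, List.cons_prefix_cons]
      rcases eq_or_ne q' [] with rfl | hne
      · have hd : d = '_' := by simpa using hq
        subst hd
        constructor
        · rintro (h | ⟨x, hx, hxe⟩)
          · split_ifs at h with hc
            · simp only [List.mem_singleton, List.cons.injEq] at h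
              exact ⟨h.1, List.nil_prefix⟩
            · simp at h
          · simp only [List.cons_append, List.nil_append, List.cons.injEq] at hxe
            obtain ⟨-, hx0⟩ := hxe
            subst hx0
            have := mem_pvUprefs_getLast [] hx
            simp at this
        · rintro ⟨rfl, -⟩
          left; simp
      · obtain ⟨e, t', rfl⟩ := List.exists_cons_of_ne_nil hne
        have hq'' : (e :: t').getLast? = some '_' := by simpa using hq
        constructor
        · rintro (h | ⟨x, hx, hxe⟩)
          · split_ifs at h with hc
            · simp at h
            · simp at h
          · simp only [List.cons_append, List.nil_append, List.cons.injEq] at hxe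
            obtain ⟨rfl, hx2⟩ := hxe
            subst hx2
            exact ⟨rfl, (ihq hq'' rest).mp hx⟩
        · rintro ⟨rfl, hpre⟩
          right
          exact ⟨e :: t', (ihq hq'' rest).mpr hpre, rfl⟩

lemma mem_pvAddUPrefixes_aux (q : List Char) (col : List Char) :
    ∀ p0 s0, (q ∈ (col.foldl (fun (p : List Char × PySem.Set (List Char)) ch =>
      let pref := p.1 ++ [ch]
      (pref, if ch = '_' then PySem.Set.add p.2 pref else p.2)) (p0, s0)).2
      ↔ q ∈ s0 ∨ q ∈ pvUprefs p0 col) := by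
  induction col with
  | nil => intro p0 s0; simp [pvUprefs]
  | cons c rest ih =>
    intro p0 s0
    simp only [List.foldl_cons, ih, pvUprefs, List.mem_append]
    split_ifs with hc
    · rw [PySem.Set.mem_add]
      simp [or_assoc]
    · simp

lemma mem_pvAddUPrefixes {q : List Char} {s : PySem.Set (List Char)} {col : List Char} :
    q ∈ pvAddUPrefixes s col ↔ q ∈ s ∨ q ∈ pvUprefs [] col := by
  unfold pvAddUPrefixes
  exact mem_pvAddUPrefixes_aux q col [] s

lemma mem_prefixIndex (q : List Char) (columns : List String) :
    ∀ s0, (q ∈ columns.foldl (fun s col => pvAddUPrefixes s col.toList) s0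
      ↔ q ∈ s0 ∨ ∃ col ∈ columns, q ∈ pvUprefs [] col.toList) := by
  induction columns with
  | nil => intro s0; simp
  | cons c rest ih =>
    intro s0
    simp only [List.foldl_cons, ih, mem_pvAddUPrefixes, List.mem_cons]
    constructor
    · rintro ((h | h) | ⟨col, hcol, h⟩)
      · exact Or.inl h
      · exact Or.inr ⟨c, Or.inl rfl, h⟩
      · exact Or.inr ⟨col, Or.inr hcol, h⟩
    · rintro (h | ⟨col, (rfl | hcol), h⟩)
      · exact Or.inl (Or.inl h)
      · exact Or.inl (Or.inr h)
      · exact Or.inr ⟨col, hcol, h⟩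

-- The key bridge: membership of cand ++ "_" in B's index equals A's `any(col.startswith(cand + "_"))`.
lemma contains_prefixIndex (c : List Char) (columns : List String) :
    PySem.Set.contains (columns.foldl (fun s col => pvAddUPrefixes s col.toList) PySem.Set.empty) (c ++ ['_'])
      = columns.any (fun col => PySem.Chars.startswith col.toList (c ++ ['_'])) := by
  rw [Bool.eq_iff_iff, PySem.Set.contains_iff, List.any_eq_true, mem_prefixIndex]
  constructor
  · rintro (h | ⟨col, hcol, h⟩)
    · simp [PySem.Set.empty] at h
    · exact ⟨col, hcol, (PySem.Chars.startswith_iff _ _).mpr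
        ((mem_pvUprefs_iff _ List.getLast?_concat _).mp h)⟩
  · rintro ⟨col, hcol, h⟩
    exact Or.inr ⟨col, hcol, (mem_pvUprefs_iff _ List.getLast?_concat _).mpr
      ((PySem.Chars.startswith_iff _ _).mp h)⟩

-- ===== VERDICT (by name: the statement is the Claim_ definition above) =====
theorem resolve_base_alias_spec : Claim_equal_resolve_base_alias := by
  intro base columns _
  unfold Spec_resolve_base_alias resolve_base_alias resolve_base_alias_alt pvLowerFallback
  simp only [contains_prefixIndex, List.cons_append, List.nil_append]
  rcases h1 : columns.any (fun col => PySem.Chars.startswith col.toList (base.toList ++ ['_'])) with _ | _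
  · rcases hg : (PySem.Chars.startswith base.toList ['B'] && PySem.Chars.strIsdigit base.toList.tail) with _ | _
    · rcases h3 : columns.any (fun col => PySem.Chars.startswith col.toList
        (PySem.Chars.lower base.toList ++ ['_'])) with _ | _
      · simp [h1, h3, List.find?]
      · simp [h1, h3, List.find?]
    · rcases h2 : columns.any (fun col => PySem.Chars.startswith col.toList
        ('B' :: (PySem.Chars.zfill (PySem.Int.toChars ((PySem.Int.ofChars? base.toList.tail).getD 0)) 2 ++ ['_']))) with _ | _
      · rcases h3 : columns.any (fun col => PySem.Chars.startswith col.toList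
          (PySem.Chars.lower base.toList ++ ['_'])) with _ | _
        · simp [h1, h2, h3, List.find?]
        · simp [h1, h2, h3, List.find?]
      · simp [h1, h2, List.find?]
  · simp [h1, List.find?, String.ofList_toList]
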